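-- pv_equiv track=rewrite | github.com/samyak1409/DSA | SDE Sheet/01) Arrays/002.2) Find Triangular Sum of an Array.py | triangular_sum
-- ===== SOURCE A (Python) =====
-- def triangular_sum(nums: list[int]) -> int:
--     """"""
--
--     # 0) Brute-force (Calculate each row iteratively): TC = O(n^2); SC = O(n)
--
--     # 1) Optimal (Calculate the Multipliers): TC = O(n); SC = O(1)
--     # Each number in the array contributes to the final sum a certain number of times. We can visualize how to figure
--     # out factors for each number using Pascal's triangle:
--     # https://upload.wikimedia.org/wikipedia/commons/0/0d/PascalTriangleAnimated2.gif    1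
--     #                                                                                  1   1
--     #                                                                                1   2   1
--     #                                                                              1   3   3   1
--     #                                                                            1   4   6   4   1
--     # For test case [1, 2, 3, 4, 5], we will get 1*1 + 2*4 + 3*6 + 4*4 + 5*1 = 1+8+18+16+5 = 48, or 8 after modulo 10.
--     # Calculating the multipliers using:
--     # https://github.com/samyak1409/DSA/blob/main/SDE%20Sheet/01%29%20Arrays/002.1%29%20Pascal%27s%20Triangle%20II.py
--     # Multipliers will be nothing but n-th (len(nums)-th) row in Pascal's Triangle, why?
--     # Because both, the triangle here and the Pascal's triangle, are based on the same base logic that new sum is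
--     # formed using the sum of two values above in the triangle.
--
--     n = len(nums)
--     multiplier = 1  # init
--     ans = nums[0] * multiplier
--     for i in range(1, n):
--         multiplier = (multiplier*(n-i)) // i
--         ans += nums[i] * multiplier
--     return ans % 10
-- ===== SOURCE B (Python) =====
-- def triangular_sum(nums: list[int]) -> int:
--     # Canonical Pascal-triangle row reduction: repeatedly replace the row by
--     # adjacent sums mod 10 until one element remains.
--     while len(nums) > 1:
--         nums = [(a + b) % 10 for a, b in zip(nums, nums[1:])]
--     return nums[0] % 10
-- ===== Notes on version B (the rewrite author's own statement) =====
-- stated objective: alternative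
-- what changed: Replaces the binomial-multiplier accumulation (iteratively computed Pascal-row coefficients times elements, one final mod 10) by the direct row-by-row reduction: repeatedly map the list to adjacent sums mod 10 until one element remains.
-- outside the precondition, e.g. on triangular_sum([]): A raises IndexError, B raises IndexError
import Mathlib
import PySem

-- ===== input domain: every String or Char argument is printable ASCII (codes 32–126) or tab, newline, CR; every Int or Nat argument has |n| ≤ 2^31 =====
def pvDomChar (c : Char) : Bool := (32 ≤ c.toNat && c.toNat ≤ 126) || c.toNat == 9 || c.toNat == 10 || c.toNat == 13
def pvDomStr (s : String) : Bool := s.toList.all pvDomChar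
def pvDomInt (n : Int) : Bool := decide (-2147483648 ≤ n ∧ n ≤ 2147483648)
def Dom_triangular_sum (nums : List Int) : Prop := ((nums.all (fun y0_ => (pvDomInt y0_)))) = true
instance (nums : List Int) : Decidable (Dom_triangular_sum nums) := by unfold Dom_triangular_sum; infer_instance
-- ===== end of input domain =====

-- B replaces A's binomial-multiplier loop by the direct Pascal row-by-row reduction
-- (adjacent sums mod 10) — an alternative algorithm, not claimed faster.

-- ===== PORT A =====
-- A: n = len(nums); multiplier = 1; ans = nums[0]*multiplier;
--    for i in range(1, n): multiplier = (multiplier*(n-i))//i; ans += nums[i]*multiplier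
--    return ans % 10
def triangular_sum (nums : List Int) : Int :=
  let n : Int := nums.length
  let multiplier : Int := 1
  let ans : Int := PySem.List.pyGetD nums 0 0 * multiplier
  let st := (PySem.List.pyRange 1 n 1).foldl
    (fun (st : Int × Int) i =>
      let m := PySem.Int.floordiv (st.1 * (n - i)) i
      (m, st.2 + PySem.List.pyGetD nums i 0 * m))
    (multiplier, ans)
  PySem.Int.mod st.2 10

-- ===== PORT B =====
-- one pass of B's while loop: [(a + b) % 10 for a, b in zip(nums, nums[1:])]
def pvReduceRow (xs : List Int) : List Int :=
  List.zipWith (fun a b => PySem.Int.mod (a + b) 10) xs xs.tail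

theorem pvReduceRow_length (xs : List Int) : (pvReduceRow xs).length = xs.length - 1 := by
  simp [pvReduceRow]

def triangular_sum_alt (nums : List Int) : Int :=
  if 1 < nums.length then
    triangular_sum_alt (pvReduceRow nums)
  else
    PySem.Int.mod (PySem.List.pyGetD nums 0 0) 10
termination_by nums.length
decreasing_by simp only [pvReduceRow_length]; omega

-- ===== PRECONDITION & SPEC =====
-- Pre_ excludes only the empty list, on which both A and B raise IndexError (nums[0]).
def Pre_triangular_sum (nums : List Int) : Prop := nums ≠ []
instance (nums : List Int) : Decidable (Pre_triangular_sum nums) := by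
  unfold Pre_triangular_sum; infer_instance

def pvWitness_triangular_sum : List Int := [1, 2, 3, 4, 5]

def Spec_triangular_sum (nums : List Int) (out : Int) : Prop := out = triangular_sum_alt nums
instance (nums : List Int) (out : Int) : Decidable (Spec_triangular_sum nums out) := by
  unfold Spec_triangular_sum; infer_instance

-- ===== CLAIM (what is proved, stated in full; the proofs are below) =====
def Claim_equal_triangular_sum : Prop := ∀ (nums : List Int), Dom_triangular_sum nums → Pre_triangular_sum nums → Spec_triangular_sum nums (triangular_sum nums)

-- ===== LEMMAS AND PROOFS =====

-- the common value both programs compute before the final % 10: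
-- the Pascal-weighted sum  ∑ C(len-1, i) * nums[i]
def pvW (xs : List Int) : Int :=
  ∑ i ∈ Finset.range xs.length, ((xs.length - 1).choose i : Int) * xs.getD i 0

-- Pascal identity for weighted sums
theorem pv_pascal_sum (g : ℕ → ℤ) (n : ℕ) :
    ∑ i ∈ Finset.range (n + 1), (n.choose i : ℤ) * (g i + g (i + 1))
      = ∑ i ∈ Finset.range (n + 2), ((n + 1).choose i : ℤ) * g i := by
  have hR : ∑ i ∈ Finset.range (n + 2), ((n + 1).choose i : ℤ) * g i
      = (∑ i ∈ Finset.range (n + 1), ((n + 1).choose (i + 1) : ℤ) * g (i + 1))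
        + ((n + 1).choose 0 : ℤ) * g 0 := Finset.sum_range_succ' _ _
  have hshift : ∑ i ∈ Finset.range (n + 2), (n.choose i : ℤ) * g i
      = (∑ i ∈ Finset.range (n + 1), (n.choose (i + 1) : ℤ) * g (i + 1))
        + (n.choose 0 : ℤ) * g 0 := Finset.sum_range_succ' _ _
  have hlast : ∑ i ∈ Finset.range (n + 2), (n.choose i : ℤ) * g i
      = (∑ i ∈ Finset.range (n + 1), (n.choose i : ℤ) * g i)
        + (n.choose (n + 1) : ℤ) * g (n + 1) := Finset.sum_range_succ _ _
  rw [hR]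
  have hsplit : ∀ i ∈ Finset.range (n + 1),
      ((n + 1).choose (i + 1) : ℤ) * g (i + 1)
        = (n.choose i : ℤ) * g (i + 1) + (n.choose (i + 1) : ℤ) * g (i + 1) := by
    intro i _
    have : (n + 1).choose (i + 1) = n.choose i + n.choose (i + 1) := Nat.choose_succ_succ n i
    rw [this]; push_cast; ring
  rw [Finset.sum_congr rfl hsplit, Finset.sum_add_distrib]
  have h2 : (∑ i ∈ Finset.range (n + 1), (n.choose (i + 1) : ℤ) * g (i + 1))
      + ((n + 1).choose 0 : ℤ) * g 0
      = ∑ i ∈ Finset.range (n + 1), (n.choose i : ℤ) * g i := by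
    have c0 : ((n + 1).choose 0 : ℤ) * g 0 = (n.choose 0 : ℤ) * g 0 := by simp
    rw [c0, ← hshift, hlast, Nat.choose_succ_self]
    push_cast; ring
  have hfin : (∑ i ∈ Finset.range (n + 1), (n.choose i : ℤ) * g (i + 1))
      + (∑ i ∈ Finset.range (n + 1), (n.choose (i + 1) : ℤ) * g (i + 1))
      + ((n + 1).choose 0 : ℤ) * g 0
      = (∑ i ∈ Finset.range (n + 1), (n.choose i : ℤ) * g (i + 1))
        + ∑ i ∈ Finset.range (n + 1), (n.choose i : ℤ) * g i := by
    rw [add_assoc, h2]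
  rw [hfin, ← Finset.sum_add_distrib]
  exact Finset.sum_congr rfl (fun i _ => by ring)

theorem pvReduceRow_getD (xs : List Int) (i : ℕ) (hi : i < xs.length - 1) :
    (pvReduceRow xs).getD i 0
      = PySem.Int.mod (xs.getD i 0 + xs.getD (i + 1) 0) 10 := by
  have h1 : i < (pvReduceRow xs).length := by rw [pvReduceRow_length]; omega
  have hx : i < xs.length := by omega
  have hx1 : i + 1 < xs.length := by omega
  have ht : i < xs.tail.length := by simp [List.length_tail]; omega
  rw [List.getD_eq_getElem _ _ h1, List.getD_eq_getElem _ _ hx, List.getD_eq_getElem _ _ hx1]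
  simp [pvReduceRow, List.getElem_zipWith, List.getElem_tail]

-- one reduction step preserves the weighted sum mod 10
theorem pvW_reduce_modeq (xs : List Int) (h2 : 2 ≤ xs.length) :
    pvW (pvReduceRow xs) ≡ pvW xs [ZMOD 10] := by
  obtain ⟨m, hm⟩ : ∃ m, xs.length = m + 2 := ⟨xs.length - 2, by omega⟩
  have h10 : ((10 : ℕ) : ℤ) = 10 := by norm_num
  rw [← h10, ← ZMod.intCast_eq_intCast_iff]
  have hlen : (pvReduceRow xs).length = m + 1 := by simp [pvReduceRow_length, hm]
  have hL : pvW (pvReduceRow xs)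
      = ∑ i ∈ Finset.range (m + 1),
          (m.choose i : ℤ) * PySem.Int.mod (xs.getD i 0 + xs.getD (i + 1) 0) 10 := by
    unfold pvW
    rw [hlen]
    refine Finset.sum_congr rfl ?_
    intro i hi
    rw [pvReduceRow_getD xs i (by simp at hi; omega)]
    norm_num
  have hX : pvW xs = ∑ i ∈ Finset.range (m + 2), ((m + 1).choose i : ℤ) * xs.getD i 0 := by
    unfold pvW
    rw [hm]
    refine Finset.sum_congr rfl ?_
    intro i _
    congr 3
  rw [hL, hX, ← pv_pascal_sum (fun i => xs.getD i 0) m]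
  push_cast
  refine Finset.sum_congr rfl ?_
  intro i _
  congr 1
  rw [PySem.Int.mod_eq_emod_of_pos (by norm_num), ← h10, ZMod.intCast_mod]
  push_cast
  ring

-- B computes the weighted sum mod 10
theorem alt_eq_mod_pvW : ∀ (nums : List Int), nums ≠ [] →
    triangular_sum_alt nums = PySem.Int.mod (pvW nums) 10 := by
  intro nums hne
  induction hn : nums.length using Nat.strong_induction_on generalizing nums with
  | _ n ih =>
    by_cases h1 : 1 < nums.length
    · rw [triangular_sum_alt]
      simp only [h1, if_true]
      have hrne : pvReduceRow nums ≠ [] := by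
        have := pvReduceRow_length nums
        intro h; rw [h] at this; simp at this; omega
      have hrl : (pvReduceRow nums).length < n := by
        rw [pvReduceRow_length]; omega
      rw [ih _ hrl _ hrne rfl]
      have hcong := pvW_reduce_modeq nums (by omega)
      rw [PySem.Int.mod_eq_emod_of_pos (by norm_num : (0:ℤ) < 10),
          PySem.Int.mod_eq_emod_of_pos (by norm_num : (0:ℤ) < 10)]
      exact hcong
    · -- length = 1
      obtain ⟨a, rest, rfl⟩ : ∃ a rest, nums = a :: rest := by
        cases nums with
        | nil => exact absurd rfl hne
        | cons a rest => exact ⟨a, rest, rfl⟩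
      have : rest = [] := by
        cases rest with
        | nil => rfl
        | cons b t => simp at h1
      subst this
      rw [triangular_sum_alt]
      simp [pvW, PySem.List.pyGetD_zero]

-- A's loop invariant: after range(1, k) the state is (C(n-1, k-1), ∑_{i<k} C(n-1,i)*nums[i])
theorem a_loop_invariant (nums : List Int) :
    ∀ k : ℕ, 1 ≤ k → k ≤ nums.length →
    (PySem.List.pyRange 1 (k : Int) 1).foldl
        (fun (st : Int × Int) i =>
          let m := PySem.Int.floordiv (st.1 * ((nums.length : Int) - i)) i
          (m, st.2 + PySem.List.pyGetD nums i 0 * m))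
        (1, PySem.List.pyGetD nums 0 0 * 1)
      = (((nums.length - 1).choose (k - 1) : Int),
         ∑ i ∈ Finset.range k, ((nums.length - 1).choose i : Int) * nums.getD i 0) := by
  intro k hk1 hkn
  induction k with
  | zero => omega
  | succ k ih =>
    by_cases hk : k = 0
    · subst hk
      rw [show ((1 : ℕ) : Int) = 1 by norm_num, PySem.List.pyRange_one_eq_nil (by omega)]
      simp [PySem.List.pyGetD_zero]
    · have hk1' : 1 ≤ k := by omega
      have hkn' : k ≤ nums.length := by omega
      have hsplit : PySem.List.pyRange 1 ((k + 1 : ℕ) : Int) 1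
          = PySem.List.pyRange 1 (k : Int) 1 ++ [(k : Int)] := by
        push_cast
        exact PySem.List.pyRange_one_succ_right (by exact_mod_cast hk1')
      rw [hsplit, List.foldl_append, ih hk1' hkn']
      simp only [List.foldl_cons, List.foldl_nil]
      have hchoose : ((nums.length - 1).choose (k - 1) : Int) * ((nums.length : Int) - (k : Int))
          = ((nums.length - 1).choose k : Int) * (k : Int) := by
        have hker : (nums.length - 1).choose ((k - 1) + 1) * ((k - 1) + 1)
            = (nums.length - 1).choose (k - 1) * ((nums.length - 1) - (k - 1)) :=
          Nat.choose_succ_right_eq _ _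
        have e1 : (k - 1) + 1 = k := by omega
        have e2 : (nums.length - 1) - (k - 1) = nums.length - k := by omega
        rw [e1, e2] at hker
        have : ((nums.length - 1).choose k * k : ℕ) = ((nums.length - 1).choose (k - 1) * (nums.length - k) : ℕ) := hker
        have hc := congrArg (fun x : ℕ => (x : Int)) this
        push_cast at hc
        rw [Int.ofNat_sub hkn'] at hc
        linarith [hc]
      have hmul : PySem.Int.floordiv (((nums.length - 1).choose (k - 1) : Int) * ((nums.length : Int) - (k : Int))) (k : Int)
          = ((nums.length - 1).choose k : Int) := by
        rw [hchoose, PySem.Int.floordiv_eq_ediv_of_pos (by exact_mod_cast hk1')]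
        exact Int.mul_ediv_cancel _ (by exact_mod_cast hk)
      simp only [hmul, Nat.add_sub_cancel, Prod.mk.injEq, true_and]
      rw [Finset.sum_range_succ, PySem.List.pyGetD_natCast]
      ring

-- A computes the weighted sum mod 10
theorem a_eq_mod_pvW (nums : List Int) (hne : nums ≠ []) :
    triangular_sum nums = PySem.Int.mod (pvW nums) 10 := by
  have hlen : 1 ≤ nums.length := by
    cases nums with
    | nil => exact absurd rfl hne
    | cons a t => simp
  simp only [triangular_sum]
  rw [a_loop_invariant nums nums.length hlen le_rfl]
  rfl

-- ===== VERDICT (by name: the statement is the Claim_ definition above) =====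
theorem triangular_sum_spec : Claim_equal_triangular_sum := by
  intro nums _ hpre
  unfold Spec_triangular_sum
  rw [a_eq_mod_pvW nums hpre, alt_eq_mod_pvW nums hpre]
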